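-- pv_equiv track=rewrite | github.com/Skalersaas/holbertonschool-Markdown2HTML | markdown2html.py | UL
-- ===== SOURCE A (Python) =====
-- def UL(lines, i):
--     ul = "<ul>\n"
--     count = 0
--     for j in range(i,len(lines)):
--         line = lines[j]
--         if(line[0]=="-"):
--             count+=1
--             ul+="<li>"+line[1:]+"</li>\n"
--         else:
--             break
--     ul+="</ul>"
--     return (ul,count)
-- ===== SOURCE B (Python) =====
-- def UL(lines, i):
--     # Phase 1: scan the run, pushing item bodies onto a stack.
--     stack = []
--     j = i
--     n = len(lines)
--     while j < n and lines[j][0] == "-":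
--         stack.append(lines[j][1:])
--         j += 1
--     count = len(stack)
--     # Phase 2: unwind the stack, building the item block back-to-front
--     # by prepending each popped item in front of what is already built.
--     items = ""
--     while stack:
--         items = "<li>" + stack.pop() + "</li>\n" + items
--     return ("<ul>\n" + items + "</ul>", count)
-- ===== Notes on version B (the rewrite author's own statement) =====
-- stated objective: alternative
-- what changed: B replaces A's single interleaved loop (which accumulates the growing HTML string and the count together) by a stack discipline: a first loop pushes the item bodies onto a stack, the count is taken as the stack's length, and a second loop pops the stack, assembling the item block BACK-TO-FRONT by prepending each popped item to what is already built.
import Mathlib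
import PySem

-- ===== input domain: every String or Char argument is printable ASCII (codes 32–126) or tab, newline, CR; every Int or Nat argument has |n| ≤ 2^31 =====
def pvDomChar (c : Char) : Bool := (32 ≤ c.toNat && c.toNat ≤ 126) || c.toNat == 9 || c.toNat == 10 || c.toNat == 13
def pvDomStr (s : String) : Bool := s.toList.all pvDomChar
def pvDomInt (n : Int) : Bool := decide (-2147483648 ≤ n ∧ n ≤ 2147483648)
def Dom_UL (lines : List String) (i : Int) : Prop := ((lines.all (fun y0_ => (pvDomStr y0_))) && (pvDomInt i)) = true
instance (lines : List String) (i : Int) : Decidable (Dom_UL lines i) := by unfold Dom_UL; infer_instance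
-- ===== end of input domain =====

-- B is an alternative, stack-based decomposition: A interleaves counting and HTML
-- accumulation in one forward loop; B pushes the item bodies onto a stack, takes the
-- count as its length, then pops the stack building the item block back-to-front.

-- shared low-level expressions: lines[j] (unreachable default for out-of-range, excluded
-- by Pre_), lines[j][0] == "-", and the slice lines[j][1:]
def pvLine (lines : List String) (j : Int) : String := (PySem.List.pyGet? lines j).getD ""
def pvDashAt (lines : List String) (j : Int) : Bool := PySem.Str.pyGet? (pvLine lines j) 0 == some '-'
def pvBody (lines : List String) (j : Int) : String := PySem.Str.slice (pvLine lines j) (some 1) none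

-- ===== PORT A =====
-- the for-loop over range(i, len(lines)) with its break, accumulating ul and count
def UL_goA (lines : List String) : List Int → String → Int → String × Int
  | [], ul, count => (ul ++ "</ul>", count)
  | j :: js, ul, count =>
    if pvDashAt lines j then
      UL_goA lines js (ul ++ ("<li>" ++ pvBody lines j ++ "</li>\n")) (count + 1)
    else
      (ul ++ "</ul>", count)

def UL (lines : List String) (i : Int) : String × Int :=
  UL_goA lines (PySem.List.pyRange i (lines.length : Int) 1) "<ul>\n" 0

-- ===== PORT B =====
-- phase 1: 'while j < n and lines[j][0] == "-": stack.append(lines[j][1:]); j += 1'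
-- (fuel = number of remaining indices below n)
def UL_push (lines : List String) (n : Int) : Nat → Int → List String → List String
  | 0, _, stack => stack
  | f + 1, j, stack =>
    if j < n then
      (if pvDashAt lines j then UL_push lines n f (j + 1) (stack ++ [pvBody lines j])
       else stack)
    else stack

-- phase 2: 'while stack: items = "<li>" + stack.pop() + "</li>\n" + items'
-- stack.pop() removes the LAST element, so the loop walks the reversed stack
def UL_pop : List String → String → String
  | [], items => items
  | s :: rest, items => UL_pop rest ("<li>" ++ s ++ "</li>\n" ++ items)

def UL_alt (lines : List String) (i : Int) : String × Int :=
  let n : Int := lines.length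
  let stack := UL_push lines n (n - i).toNat i []
  let count : Int := stack.length
  let items := UL_pop stack.reverse ""
  ("<ul>\n" ++ items ++ "</ul>", count)

-- ===== PRECONDITION & SPEC =====
-- true iff scanning s for the first non-dash-prefixed line does not stop at an empty line
def pvSafe (s : List String) : Bool :=
  !((s.dropWhile (fun l => l.toList.head? == some '-')).head? == some "")

-- Pre_UL holds exactly when Python A returns: it excludes only the inputs on which A raises
-- IndexError — an empty line at the frontier of the dash run (line[0] on ""), or an index
-- j < -len(lines) reached when i < -len(lines) (lines[j] out of range).
def Pre_UL (lines : List String) (i : Int) : Prop :=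
  (lines.length : Int) ≤ i ∨
  (0 ≤ i ∧ pvSafe (lines.drop i.toNat) = true) ∨
  (i < 0 ∧ -(lines.length : Int) ≤ i ∧
    pvSafe (lines.drop ((lines.length : Int) + i).toNat ++ lines) = true)
instance (lines : List String) (i : Int) : Decidable (Pre_UL lines i) := by
  unfold Pre_UL; infer_instance

def pvWitness_UL : List String × Int := (["-a", "-b", "x"], 1)

def Spec_UL (lines : List String) (i : Int) (out : String × Int) : Prop := out = UL_alt lines i
instance (lines : List String) (i : Int) (out : String × Int) : Decidable (Spec_UL lines i out) := by
  unfold Spec_UL; infer_instance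

-- ===== CLAIM (what is proved, stated in full; the proofs are below) =====
def Claim_equal_UL : Prop :=
  ∀ (lines : List String) (i : Int), Dom_UL lines i → Pre_UL lines i → Spec_UL lines i (UL lines i)

-- ===== LEMMAS AND PROOFS =====

-- forward-order rendering of a list of item bodies (proof-side characterisation)
def pvItems : List String → String
  | [] => ""
  | s :: rest => ("<li>" ++ s ++ "</li>\n") ++ pvItems rest

lemma pvItems_append (a b : List String) : pvItems (a ++ b) = pvItems a ++ pvItems b := by
  induction a with
  | nil => simp [pvItems]
  | cons s rest ih => simp [pvItems, ih, String.append_assoc]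

-- popping the whole stack prepends the items in forward order
lemma UL_pop_eq (l : List String) : ∀ acc, UL_pop l acc = pvItems l.reverse ++ acc := by
  induction l with
  | nil => intro acc; simp [UL_pop, pvItems]
  | cons s rest ih =>
    intro acc
    simp only [UL_pop, ih, List.reverse_cons, pvItems_append, pvItems]
    simp [String.append_assoc]

-- the push loop only appends to the stack
lemma UL_push_acc (lines : List String) (n : Int) :
    ∀ (f : Nat) (j : Int) (st : List String),
      UL_push lines n f j st = st ++ UL_push lines n f j [] := by
  intro f
  induction f with
  | zero => intro j st; simp [UL_push]
  | succ f ih =>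
    intro j st
    simp only [UL_push]
    split_ifs with h1 h2
    · rw [ih (j + 1) (st ++ [pvBody lines j]), ih (j + 1) ([] ++ [pvBody lines j])]
      simp
    · simp
    · simp

-- A's loop renders exactly the bodies B's push loop collects, and counts their number
lemma UL_go_eq_push (lines : List String) :
    ∀ (f : Nat) (j : Int) (ul : String) (count : Int),
      ((lines.length : Int) - j).toNat ≤ f →
      UL_goA lines (PySem.List.pyRange j (lines.length : Int) 1) ul count =
        (ul ++ pvItems (UL_push lines (lines.length : Int) f j []) ++ "</ul>",
         count + (UL_push lines (lines.length : Int) f j []).length) := by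
  intro f
  induction f with
  | zero =>
    intro j ul count hf
    have hnj : (lines.length : Int) ≤ j := by omega
    rw [PySem.List.pyRange_one_eq_nil hnj]
    simp [UL_goA, UL_push, pvItems, String.append_empty]
  | succ f ih =>
    intro j ul count hf
    by_cases hj : j < (lines.length : Int)
    · rw [PySem.List.pyRange_one_cons hj]
      by_cases hd : pvDashAt lines j
      · have hstep : ((lines.length : Int) - (j + 1)).toNat ≤ f := by omega
        have hrec := ih (j + 1) (ul ++ ("<li>" ++ pvBody lines j ++ "</li>\n")) (count + 1) hstep
        simp only [UL_goA, hd, if_true]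
        rw [hrec]
        have hpush : UL_push lines (lines.length : Int) (f + 1) j [] =
            pvBody lines j :: UL_push lines (lines.length : Int) f (j + 1) [] := by
          simp only [UL_push, hj, if_true, hd]
          rw [UL_push_acc lines (lines.length : Int) f (j + 1) ([] ++ [pvBody lines j])]
          simp
        rw [hpush]
        simp only [pvItems, List.length_cons, Prod.mk.injEq]
        constructor
        · simp [String.append_assoc]
        · push_cast; omega
      · simp only [UL_goA, hd]
        have hpush : UL_push lines (lines.length : Int) (f + 1) j [] = ([] : List String) := by
          simp [UL_push, hj, hd]
        simp [hpush, pvItems, String.append_empty]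
    · have hnj : (lines.length : Int) ≤ j := by omega
      rw [PySem.List.pyRange_one_eq_nil hnj]
      have hpush : UL_push lines (lines.length : Int) (f + 1) j [] = ([] : List String) := by
        simp [UL_push]; omega
      simp [UL_goA, hpush, pvItems, String.append_empty]

-- ===== VERDICT (by name: the statement is the Claim_ definition above) =====
theorem UL_spec : Claim_equal_UL := by
  intro lines i _ _
  unfold Spec_UL UL UL_alt
  rw [UL_go_eq_push lines (((lines.length : Int) - i).toNat) i "<ul>\n" 0 (le_refl _)]
  simp [UL_pop_eq, String.append_empty]
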